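-- pv_equiv track=rewrite | github.com/SeanStafford/ARCHER | archer/utils/latex_parsing_tools.py | extract_sequential_params
-- ===== SOURCE A (Python) =====
-- from typing import List, Tuple
--
-- def extract_sequential_params(latex_str: str, start_pos: int, num_params: int) -> List[str]:
--     """
--     Extract N sequential brace-delimited parameters from a position, handling nested braces.
--
--     Uses brace counting to correctly handle nested structures like {text {nested} more}.
--
--     Args:
--         latex_str: LaTeX source
--         start_pos: Position to start searching
--         num_params: Number of {...} parameters to extract
--
--     Returns:
--         List of extracted parameter values
--
--     Example:
--         >>> latex = (
--         ...     "\\begin{itemizeAcademic}{Company}{Title {with \\textit{nested}}}{Location}{Dates}"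
--         ... )
--         >>> extract_sequential_params(latex, 23, 4)  # Start after {itemizeAcademic}
--         ['Company', 'Title {with \\textit{nested}}', 'Location', 'Dates']
--     """
--     params = []
--     pos = start_pos
--
--     for _ in range(num_params):
--         # Find opening brace
--         while pos < len(latex_str) and latex_str[pos] != "{":
--             pos += 1
--
--         if pos >= len(latex_str):
--             break
--
--         # Count braces to find matching close
--         pos += 1  # Skip opening brace
--         brace_count = 1
--         param_start = pos
--
--         while pos < len(latex_str) and brace_count > 0:
--             if latex_str[pos] == "\\":
--                 pos += 2  # Skip escaped char
--                 continue
--             elif latex_str[pos] == "{":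
--                 brace_count += 1
--             elif latex_str[pos] == "}":
--                 brace_count -= 1
--             pos += 1
--
--         if brace_count == 0:
--             param_value = latex_str[param_start : pos - 1]
--             params.append(param_value)
--
--     return params
-- ===== SOURCE B (Python) =====
-- def _group_end(s, pos):
--     """pos is the first index inside an open group; return the index just past
--     its matching close brace, or None if the group never closes.
--     Recursive descent: a nested group is matched by a recursive call,
--     so no brace counter is needed."""
--     n = len(s)
--     while pos < n:
--         c = s[pos]
--         if c == "\\":
--             pos += 2  # skip escaped char
--         elif c == "{":
--             inner = _group_end(s, pos + 1)
--             if inner is None: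
--                 return None
--             pos = inner
--         elif c == "}":
--             return pos + 1
--         else:
--             pos += 1
--     return None
--
--
-- def extract_sequential_params(latex_str, start_pos, num_params):
--     params = []
--     pos = start_pos
--     n = len(latex_str)
--     while len(params) < num_params:
--         # advance to the next opening brace (no escape handling here)
--         while pos < n and latex_str[pos] != "{":
--             pos += 1
--         if pos >= n:
--             break
--         end = _group_end(latex_str, pos + 1)
--         if end is None:
--             break
--         params.append(latex_str[pos + 1 : end - 1])
--         pos = end
--     return params
-- ===== Notes on version B (the rewrite author's own statement) =====
-- stated objective: alternative
-- what changed: A matches a parameter's closing brace by maintaining an integer brace_count in a flat loop; B has no counter at all: a recursive-descent helper matches each nested group by calling itself, returning the index just past the matching close brace (or None for an unbalanced group), and the driver slices parameters out of the returned positions.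
import Mathlib
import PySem

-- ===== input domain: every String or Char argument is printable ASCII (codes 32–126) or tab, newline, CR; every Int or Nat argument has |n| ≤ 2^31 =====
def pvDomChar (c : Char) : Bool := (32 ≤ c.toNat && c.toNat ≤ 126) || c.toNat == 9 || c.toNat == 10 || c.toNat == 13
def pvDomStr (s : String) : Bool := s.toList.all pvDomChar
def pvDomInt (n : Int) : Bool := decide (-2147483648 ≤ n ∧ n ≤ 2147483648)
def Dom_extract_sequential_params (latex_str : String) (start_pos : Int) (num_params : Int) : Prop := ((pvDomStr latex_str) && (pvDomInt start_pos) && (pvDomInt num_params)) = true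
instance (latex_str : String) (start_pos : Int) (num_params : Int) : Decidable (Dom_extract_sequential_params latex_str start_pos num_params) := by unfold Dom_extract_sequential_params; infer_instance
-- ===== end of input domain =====

-- B replaces A's brace_count integer by a recursive-descent matcher: nested groups are
-- matched by recursive calls, no counter is kept (objective: alternative, same O(n) cost).

-- arithmetic facts cited by the ports' termination proofs
theorem pv_dec_succ {L p : Int} (h : p < L) : (L - (p + 1)).toNat < (L - p).toNat := by omega
theorem pv_dec_two {L p : Int} (h : p < L) : (L - (p + 2)).toNat < (L - p).toNat := by omega
theorem pv_lt_weak2 {p e : Int} (h : p + 2 < e) : p < e := by omega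
theorem pv_lt_weak1 {p e : Int} (h : p + 1 < e) : p < e := by omega
theorem pv_lt_succ {p : Int} : p < p + 1 := by omega
theorem pv_lt_chain {p e1 e : Int} (h1 : p + 1 < e1) (h2 : e1 < e) : p < e := by omega
theorem pv_dec_to {L p e : Int} (h1 : p < e) (h2 : p < L) : (L - e).toNat < (L - p).toNat := by omega
theorem pv_outer_dec {L p q e : Int} (h1 : p ≤ q) (h2 : q < L) (h3 : q + 1 < e) : (L - e).toNat < (L - p).toNat := by omega

-- ===== PORT A =====
-- A's first inner while-loop: while pos < len(latex_str) and latex_str[pos] != "{": pos += 1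
def pvA_search (s : String) (pos : Int) : Int :=
  if h : pos < PySem.Str.len s ∧ PySem.Str.pyGet? s pos ≠ some '{' then
    pvA_search s (pos + 1)
  else pos
termination_by (PySem.Str.len s - pos).toNat
decreasing_by exact pv_dec_succ h.1

-- A's second inner while-loop (brace counting); returns (pos, brace_count) at loop exit.
-- Python raises IndexError where pyGet? is none; the port exits there — those inputs are outside Pre_.
def pvA_inner (s : String) (pos : Int) (bc : Int) : Int × Int :=
  if h : pos < PySem.Str.len s ∧ 0 < bc then
    match PySem.Str.pyGet? s pos with
    | some c =>
      if c = '\\' then pvA_inner s (pos + 2) bc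
      else if c = '{' then pvA_inner s (pos + 1) (bc + 1)
      else if c = '}' then pvA_inner s (pos + 1) (bc - 1)
      else pvA_inner s (pos + 1) bc
    | none => (pos, bc)
  else (pos, bc)
termination_by (PySem.Str.len s - pos).toNat
decreasing_by all_goals first | exact pv_dec_two h.1 | exact pv_dec_succ h.1

-- A's outer for-loop over range(num_params)
def pvA_loop (s : String) (pos : Int) (acc : List String) : Nat → List String
  | 0 => acc
  | Nat.succ k =>
    let pos1 := pvA_search s pos
    if PySem.Str.len s ≤ pos1 then acc
    else
      let r := pvA_inner s (pos1 + 1) 1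
      if r.2 = 0 then
        pvA_loop s r.1 (acc ++ [PySem.Str.slice s (some (pos1 + 1)) (some (r.1 - 1))]) k
      else pvA_loop s r.1 acc k

def extract_sequential_params (latex_str : String) (start_pos : Int) (num_params : Int) : List String :=
  pvA_loop latex_str start_pos [] num_params.toNat

-- ===== PORT B =====
-- Source B's _group_end: recursive-descent group matcher; the subtype result carries the
-- strict-increase fact needed for termination (the computation is exactly _group_end's).
-- Python raises IndexError where pyGet? is none; the port returns none there — outside Pre_.
def pvB_group (s : String) (pos : Int) : Option {e : Int // pos < e} :=
  if h : pos < PySem.Str.len s then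
    match PySem.Str.pyGet? s pos with
    | none => none
    | some c =>
      if c = '\\' then
        match pvB_group s (pos + 2) with
        | none => none
        | some ⟨e, he⟩ => some ⟨e, pv_lt_weak2 he⟩
      else if c = '{' then
        match pvB_group s (pos + 1) with
        | none => none
        | some ⟨e1, he1⟩ =>
          match pvB_group s e1 with
          | none => none
          | some ⟨e, he⟩ => some ⟨e, pv_lt_chain he1 he⟩
      else if c = '}' then some ⟨pos + 1, pv_lt_succ⟩
      else
        match pvB_group s (pos + 1) with
        | none => none
        | some ⟨e, he⟩ => some ⟨e, pv_lt_weak1 he⟩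
  else none
termination_by (PySem.Str.len s - pos).toNat
decreasing_by all_goals
  first
  | exact pv_dec_two h
  | exact pv_dec_succ h
  | exact pv_dec_to (pv_lt_weak1 he1) h

-- Source B's search loop inside the driver (identical text to A's search loop in the source)
def pvB_search (s : String) (pos : Int) : Int :=
  if h : pos < PySem.Str.len s ∧ PySem.Str.pyGet? s pos ≠ some '{' then
    pvB_search s (pos + 1)
  else pos
termination_by (PySem.Str.len s - pos).toNat
decreasing_by exact pv_dec_succ h.1

-- needed by pvB_outer's termination proof
theorem pvB_search_ge (s : String) (pos : Int) : pos ≤ pvB_search s pos := by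
  fun_induction pvB_search s pos <;> omega

-- Source B's driver while-loop
def pvB_outer (s : String) (num : Int) (pos : Int) (acc : List String) : List String :=
  if hn : (acc.length : Int) < num then
    if hp : pvB_search s pos < PySem.Str.len s then
      match pvB_group s (pvB_search s pos + 1) with
      | none => acc
      | some ⟨e, he⟩ =>
        pvB_outer s num e
          (acc ++ [PySem.Str.slice s (some (pvB_search s pos + 1)) (some (e - 1))])
    else acc
  else acc
termination_by (PySem.Str.len s - pos).toNat
decreasing_by exact pv_outer_dec (pvB_search_ge s pos) hp he

def extract_sequential_params_alt (latex_str : String) (start_pos : Int) (num_params : Int) : List String :=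
  pvB_outer latex_str num_params start_pos []

-- ===== PRECONDITION & SPEC =====
-- Pre_ excludes exactly the inputs on which the Python A raises IndexError:
-- num_params ≥ 1 together with start_pos < -len(latex_str) (first subscript out of range).
def Pre_extract_sequential_params (latex_str : String) (start_pos : Int) (num_params : Int) : Prop :=
  num_params ≤ 0 ∨ -(PySem.Str.len latex_str) ≤ start_pos
instance (latex_str : String) (start_pos : Int) (num_params : Int) : Decidable (Pre_extract_sequential_params latex_str start_pos num_params) := by unfold Pre_extract_sequential_params; infer_instance

def pvWitness_extract_sequential_params : String × Int × Int := ("{a}", 0, 1)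

def Spec_extract_sequential_params (latex_str : String) (start_pos : Int) (num_params : Int) (out : List String) : Prop := out = extract_sequential_params_alt latex_str start_pos num_params
instance (latex_str : String) (start_pos : Int) (num_params : Int) (out : List String) : Decidable (Spec_extract_sequential_params latex_str start_pos num_params out) := by unfold Spec_extract_sequential_params; infer_instance

-- ===== CLAIM (what is proved, stated in full; the proofs are below) =====
def Claim_equal_extract_sequential_params : Prop := ∀ (latex_str : String) (start_pos : Int) (num_params : Int), Dom_extract_sequential_params latex_str start_pos num_params → Pre_extract_sequential_params latex_str start_pos num_params → Spec_extract_sequential_params latex_str start_pos num_params (extract_sequential_params latex_str start_pos num_params)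

-- ===== LEMMAS AND PROOFS =====

theorem pv_get_some (s : String) (pos : Int) (h1 : -(PySem.Str.len s) ≤ pos)
    (h2 : pos < PySem.Str.len s) : ∃ c, PySem.Str.pyGet? s pos = some c := by
  cases hg : PySem.Str.pyGet? s pos with
  | some c => exact ⟨c, rfl⟩
  | none =>
    rw [PySem.Str.pyGet?_eq, PySem.Chars.pyGet?_eq_listPyGet?,
      PySem.List.pyGet?_eq_none_iff] at hg
    rw [PySem.Str.len_eq] at h1 h2
    unfold PySem.Raise.InRange at hg
    omega

theorem pvA_search_ge (s : String) (pos : Int) : pos ≤ pvA_search s pos := by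
  fun_induction pvA_search s pos <;> omega

theorem pv_search_eq (s : String) (pos : Int) : pvB_search s pos = pvA_search s pos := by
  fun_induction pvB_search s pos with
  | case1 pos h ih => rw [pvA_search, dif_pos h]; exact ih
  | case2 pos h => rw [pvA_search, dif_neg h]

theorem pvA_search_at_end (s : String) (pos : Int) (h : PySem.Str.len s ≤ pos) :
    pvA_search s pos = pos := by
  rw [pvA_search, dif_neg]; intro hh; omega

theorem pvA_inner_unbalanced (s : String) (pos bc : Int) :
    -(PySem.Str.len s) ≤ pos → 0 ≤ bc →
    (pvA_inner s pos bc).2 ≠ 0 → PySem.Str.len s ≤ (pvA_inner s pos bc).1 := by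
  fun_induction pvA_inner s pos bc with
  | case1 pos bc h heq ih => intro hlo hbc hne; exact ih (by omega) hbc hne
  | case2 pos bc h heq hne1 ih => intro hlo hbc hne; exact ih (by omega) (by omega) hne
  | case3 pos bc h heq hne1 hne2 ih => intro hlo hbc hne; exact ih (by omega) (by omega) hne
  | case4 pos bc h c heq hne1 hne2 hne3 ih => intro hlo hbc hne; exact ih (by omega) hbc hne
  | case5 pos bc h hg =>
    intro hlo hbc hne
    obtain ⟨c, hc⟩ := pv_get_some s pos hlo h.1
    rw [hg] at hc; cases hc
  | case6 pos bc h =>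
    intro hlo hbc hne
    simp only at hne ⊢
    omega

theorem pvA_loop_dead (s : String) (pos : Int) (acc : List String) (k : Nat)
    (h : PySem.Str.len s ≤ pos) : pvA_loop s pos acc k = acc := by
  cases k with
  | zero => rfl
  | succ k =>
    rw [pvA_loop]
    simp only [pvA_search_at_end s pos h]
    rw [if_pos h]

-- Core correspondence: B's recursive-descent matcher vs A's brace counter.
-- When pvB_group finds the matching close at e, A's counter loop started with count bc
-- reaches that point with count bc-1 (so for bc = 1 it stops exactly at e);
-- when pvB_group returns none, A's counter never returns to 0.
theorem pv_group_sim (s : String) (pos : Int) :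
    ∀ (bc : Int), -(PySem.Str.len s) ≤ pos → 1 ≤ bc →
      (∀ (e : Int) (he : pos < e), pvB_group s pos = some ⟨e, he⟩ →
        pvA_inner s pos bc = (if bc = 1 then (e, 0) else pvA_inner s e (bc - 1))) ∧
      (pvB_group s pos = none → (pvA_inner s pos bc).2 ≠ 0) := by
  fun_induction pvB_group s pos with
  | case1 pos h hg =>
    intro bc hlo hbc
    obtain ⟨c, hc⟩ := pv_get_some s pos hlo h
    rw [hg] at hc; cases hc
  | case2 pos h hrec hg ih =>
    intro bc hlo hbc
    have hA : pvA_inner s pos bc = pvA_inner s (pos + 2) bc := by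
      rw [pvA_inner, dif_pos ⟨h, by omega⟩, hg]; simp
    refine ⟨fun e he hsome => by simp at hsome, fun _ => ?_⟩
    rw [hA]
    exact (ih bc (by omega) hbc).2 hrec
  | case3 pos h e he hrec hg ih =>
    intro bc hlo hbc
    have hA : pvA_inner s pos bc = pvA_inner s (pos + 2) bc := by
      rw [pvA_inner, dif_pos ⟨h, by omega⟩, hg]; simp
    refine ⟨fun e' he' hsome => ?_, fun hnone => by simp at hnone⟩
    have hee : e = e' := by simpa using hsome
    subst hee
    rw [hA]
    exact (ih bc (by omega) hbc).1 e he hrec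
  | case4 pos h hrec hg hne ih =>
    intro bc hlo hbc
    have hA : pvA_inner s pos bc = pvA_inner s (pos + 1) (bc + 1) := by
      rw [pvA_inner, dif_pos ⟨h, by omega⟩, hg]; simp
    refine ⟨fun e he hsome => by simp at hsome, fun _ => ?_⟩
    rw [hA]
    exact (ih (bc + 1) (by omega) (by omega)).2 hrec
  | case5 pos h e1 he1 hrec1 hrec2 hg hne ih1 ih2 =>
    intro bc hlo hbc
    have hstep := (ih1 (bc + 1) (by omega) (by omega)).1 e1 he1 hrec1
    rw [if_neg (by omega : ¬ bc + 1 = 1)] at hstep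
    have hstep' : pvA_inner s (pos + 1) (bc + 1) = pvA_inner s e1 bc := by
      rw [hstep]; norm_num
    have hA : pvA_inner s pos bc = pvA_inner s e1 bc := by
      rw [pvA_inner, dif_pos ⟨h, by omega⟩, hg]
      simpa using hstep'
    refine ⟨fun e he hsome => by simp at hsome, fun _ => ?_⟩
    rw [hA]
    exact (ih2 bc (by omega) hbc).2 hrec2
  | case6 pos h e1 he1 hrec1 e he hrec2 hg hne ih1 ih2 =>
    intro bc hlo hbc
    have hstep := (ih1 (bc + 1) (by omega) (by omega)).1 e1 he1 hrec1
    rw [if_neg (by omega : ¬ bc + 1 = 1)] at hstep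
    have hstep' : pvA_inner s (pos + 1) (bc + 1) = pvA_inner s e1 bc := by
      rw [hstep]; norm_num
    have hA : pvA_inner s pos bc = pvA_inner s e1 bc := by
      rw [pvA_inner, dif_pos ⟨h, by omega⟩, hg]
      simpa using hstep'
    refine ⟨fun e' he' hsome => ?_, fun hnone => by simp at hnone⟩
    have hee : e = e' := by simpa using hsome
    subst hee
    rw [hA]
    exact (ih2 bc (by omega) hbc).1 e he hrec2
  | case7 pos h hg hne1 hne2 =>
    intro bc hlo hbc
    have hA : pvA_inner s pos bc = pvA_inner s (pos + 1) (bc - 1) := by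
      rw [pvA_inner, dif_pos ⟨h, by omega⟩, hg]; simp
    refine ⟨fun e' he' hsome => ?_, fun hnone => by simp at hnone⟩
    have hee : pos + 1 = e' := by simpa using hsome
    subst hee
    rw [hA]
    by_cases h1 : bc = 1
    · subst h1
      rw [if_pos rfl, pvA_inner, dif_neg (by omega)]
      norm_num
    · rw [if_neg h1]
  | case8 pos h c hg hc1 hc2 hc3 hrec ih =>
    intro bc hlo hbc
    have hA : pvA_inner s pos bc = pvA_inner s (pos + 1) bc := by
      rw [pvA_inner, dif_pos ⟨h, by omega⟩, hg]
      simp [hc1, hc2, hc3]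
    refine ⟨fun e he hsome => by simp at hsome, fun _ => ?_⟩
    rw [hA]
    exact (ih bc (by omega) hbc).2 hrec
  | case9 pos h c hg hc1 hc2 hc3 e he hrec ih =>
    intro bc hlo hbc
    have hA : pvA_inner s pos bc = pvA_inner s (pos + 1) bc := by
      rw [pvA_inner, dif_pos ⟨h, by omega⟩, hg]
      simp [hc1, hc2, hc3]
    refine ⟨fun e' he' hsome => ?_, fun hnone => by simp at hnone⟩
    have hee : e = e' := by simpa using hsome
    subst hee
    rw [hA]
    exact (ih bc (by omega) hbc).1 e he hrec
  | case10 pos h =>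
    intro bc hlo hbc
    refine ⟨fun e he hsome => by simp at hsome, fun _ => ?_⟩
    rw [pvA_inner, dif_neg (by intro hh; omega)]
    simp only
    omega

-- Outer loops agree.
theorem pv_main (s : String) (k : Nat) :
    ∀ (pos : Int) (acc : List String), -(PySem.Str.len s) ≤ pos →
      pvA_loop s pos acc k = pvB_outer s ((acc.length : Int) + k) pos acc := by
  induction k with
  | zero =>
    intro pos acc hlo
    rw [pvB_outer, dif_neg (by push_cast; omega)]
    rfl
  | succ k ih =>
    intro pos acc hlo
    have hneed : (acc.length : Int) < (acc.length : Int) + ((k : Nat) + 1 : Nat) := by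
      push_cast; omega
    have hse := pv_search_eq s pos
    have hge := pvA_search_ge s pos
    rw [pvA_loop]
    simp only
    rw [← hse, pvB_outer, dif_pos hneed]
    by_cases hend : PySem.Str.len s ≤ pvB_search s pos
    · rw [if_pos hend, dif_neg (by omega)]
    · rw [if_neg hend, dif_pos (by omega : pvB_search s pos < PySem.Str.len s)]
      have hsim := pv_group_sim s (pvB_search s pos + 1) 1 (by omega) le_rfl
      cases hg : pvB_group s (pvB_search s pos + 1) with
      | none =>
        have hbc := hsim.2 hg
        rw [if_neg hbc]
        show pvA_loop s (pvA_inner s (pvB_search s pos + 1) 1).1 acc k = acc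
        exact pvA_loop_dead s _ acc k
          (pvA_inner_unbalanced s (pvB_search s pos + 1) 1 (by omega) (by omega) hbc)
      | some ev =>
        obtain ⟨e, he⟩ := ev
        have hA := hsim.1 e he hg
        rw [if_pos rfl] at hA
        simp only [hA]
        show (if ((e : Int), (0 : Int)).2 = 0 then
            pvA_loop s ((e : Int), (0 : Int)).1
              (acc ++ [PySem.Str.slice s (some (pvB_search s pos + 1))
                (some (((e : Int), (0 : Int)).1 - 1))]) k
          else pvA_loop s ((e : Int), (0 : Int)).1 acc k)
          = pvB_outer s ((acc.length : Int) + ((k + 1 : Nat) : Nat)) e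
              (acc ++ [PySem.Str.slice s (some (pvB_search s pos + 1)) (some (e - 1))])
        rw [if_pos rfl]
        have hlen : (((acc ++ [PySem.Str.slice s (some (pvB_search s pos + 1))
            (some (e - 1))]).length : Int) + (k : Nat))
            = (acc.length : Int) + ((k + 1 : Nat) : Nat) := by
          simp only [List.length_append, List.length_cons, List.length_nil]
          push_cast; omega
        rw [← hlen, ih e _ (by omega)]

-- ===== VERDICT (by name: the statement is the Claim_ definition above) =====
theorem extract_sequential_params_spec : Claim_equal_extract_sequential_params := by
  intro s sp np _hdom hpre
  unfold Spec_extract_sequential_params extract_sequential_params extract_sequential_params_alt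
  by_cases hnp : np ≤ 0
  · have h0 : np.toNat = 0 := by omega
    rw [h0, pvA_loop, pvB_outer, dif_neg (by intro hh; simp at hh; omega)]
  · have hlo : -(PySem.Str.len s) ≤ sp := by
      cases hpre with
      | inl h => exact absurd h hnp
      | inr h => exact h
    rw [pv_main s np.toNat sp [] hlo]
    have hn : ((List.length ([] : List String) : Int) + (np.toNat : Nat)) = np := by
      simp only [List.length_nil]; omega
    rw [hn]
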